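-- pv_equiv track=rewrite | github.com/anamsell/Npuzzle | Heuristic.py | linear_conflict_and_manhattan
-- ===== SOURCE A (Python) =====
-- def get_areas(start, end, size):
--     areas = 0
--     abscissa = [start[0], end[0]]
--     ordered = [start[1], end[1]]
--     abscissa.sort()
--     ordered.sort()
--     for x in range(abscissa[0] + 1, abscissa[1] + 2):
--         for y in range(ordered[0] + 1, ordered[1] + 2):
--             areas += x + y * size
--     return areas
--
-- def conflict(areas_list, new_areas):
--     number = 0
--     for val in areas_list:
--         number += not not val & new_areas
--     return number
--
-- def linear_conflict_and_manhattan(puzzle, puzzle_solution):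
--     score = 0
--     areas = list()
--     size = len(puzzle[0])
--     for index1, line in enumerate(puzzle):
--         for index2, value in enumerate(line):
--             if value == 0:
--                 continue
--             val = abs(index1 - puzzle_solution[value - 1][0]) + abs(index2 - puzzle_solution[value - 1][1])
--             if val:
--                 score += val
--                 new_area = get_areas((index1, index2), puzzle_solution[value-1], size)
--                 score += conflict(areas, new_area) * 2
--                 areas += [new_area]
--     return score
-- ===== SOURCE B (Python) =====
-- def _area_mask(i, j, ti, tj, size):
--     a0, a1 = (i, ti) if i <= ti else (ti, i)
--     b0, b1 = (j, tj) if j <= tj else (tj, j)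
--     nx = a1 - a0 + 1
--     ny = b1 - b0 + 1
--     sx = nx * (a0 + a1 + 2) // 2
--     sy = ny * (b0 + b1 + 2) // 2
--     return ny * sx + nx * size * sy
--
-- def linear_conflict_and_manhattan(puzzle, puzzle_solution):
--     size = len(puzzle[0])
--     score = 0
--     moved = []
--     for i, line in enumerate(puzzle):
--         for j, value in enumerate(line):
--             if value == 0:
--                 continue
--             target = puzzle_solution[value - 1]
--             d = abs(i - target[0]) + abs(j - target[1])
--             if d:
--                 score += d
--                 moved.append(_area_mask(i, j, target[0], target[1], size))
--     for l in range(len(moved)):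
--         for k in range(l):
--             if moved[k] & moved[l]:
--                 score += 2
--     return score
-- ===== Notes on version B (the rewrite author's own statement) =====
-- stated objective: faster
-- what changed: B replaces A's per-tile double summation loop in get_areas by the closed-form arithmetic-series formula (O(1) per tile instead of O(dx*dy)), and counts linear conflicts in a separate pairwise pass over the collected area masks instead of interleaving conflict counting with the scan.
import Mathlib
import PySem

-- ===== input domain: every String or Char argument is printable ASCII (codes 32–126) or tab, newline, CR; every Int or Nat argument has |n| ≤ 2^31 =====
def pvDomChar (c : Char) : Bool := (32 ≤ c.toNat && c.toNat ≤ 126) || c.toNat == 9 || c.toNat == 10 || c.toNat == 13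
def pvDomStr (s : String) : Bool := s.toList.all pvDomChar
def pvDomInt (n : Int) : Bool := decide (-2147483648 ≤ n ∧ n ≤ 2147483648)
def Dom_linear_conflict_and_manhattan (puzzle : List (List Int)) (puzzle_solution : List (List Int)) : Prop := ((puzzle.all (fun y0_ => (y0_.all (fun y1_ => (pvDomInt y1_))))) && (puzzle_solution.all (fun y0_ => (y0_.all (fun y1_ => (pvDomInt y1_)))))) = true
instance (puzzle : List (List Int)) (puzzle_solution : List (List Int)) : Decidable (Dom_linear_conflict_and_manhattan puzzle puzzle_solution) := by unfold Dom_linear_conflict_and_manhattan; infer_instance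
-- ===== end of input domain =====

-- B replaces A's per-tile double summation loop in get_areas by the closed-form
-- arithmetic-series formula and counts the linear conflicts in a separate pass
-- after collecting the area masks, instead of interleaving conflict counting
-- with the scan (objective: faster area computation).

-- ===== PORT A =====
-- get_areas(start, end, size)
def pvGetAreas (start : Int × Int) (end_ : Int × Int) (size : Int) : Int :=
  let abscissa := PySem.List.sorted [start.1, end_.1] (fun x => x) false
  let ordered := PySem.List.sorted [start.2, end_.2] (fun x => x) false
  let a0 := PySem.List.pyGetD abscissa 0 0
  let a1 := PySem.List.pyGetD abscissa 1 0
  let o0 := PySem.List.pyGetD ordered 0 0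
  let o1 := PySem.List.pyGetD ordered 1 0
  (PySem.List.pyRange (a0 + 1) (a1 + 2) 1).foldl (fun areas x =>
    (PySem.List.pyRange (o0 + 1) (o1 + 2) 1).foldl (fun areas y => areas + (x + y * size)) areas) 0

-- conflict(areas_list, new_areas): 'not not val & new_areas' is bool(val & new_areas)
def pvConflict (areas_list : List Int) (new_areas : Int) : Int :=
  areas_list.foldl (fun number val => number + (if PySem.Int.band val new_areas ≠ 0 then 1 else 0)) 0

-- body of A's inner loop over one cell (index2, value); i1 is the row index
def pvCellA (sol : List (List Int)) (size i1 : Int) (st : Int × List Int) (q : Int × Int) : Int × List Int :=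
  if q.2 = 0 then st else
  let row := (PySem.List.pyGet? sol (q.2 - 1)).getD []   -- puzzle_solution[value-1]; Pre_ excludes the IndexError
  let r0 := PySem.List.pyGetD row 0 0                     -- row[0]; Pre_ guarantees 2 ≤ row.length
  let r1 := PySem.List.pyGetD row 1 0
  let val := |i1 - r0| + |q.1 - r1|
  if val ≠ 0 then
    let new_area := pvGetAreas (i1, q.1) (r0, r1) size
    (st.1 + val + pvConflict st.2 new_area * 2, st.2 ++ [new_area])
  else st

def linear_conflict_and_manhattan (puzzle : List (List Int)) (puzzle_solution : List (List Int)) : Int :=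
  let size : Int := ((PySem.List.pyGetD puzzle 0 []).length : Int)  -- len(puzzle[0]); Pre_ excludes puzzle = []
  ((PySem.List.enumerate puzzle 0).foldl (fun st p =>
    (PySem.List.enumerate p.2 0).foldl (pvCellA puzzle_solution size p.1) st) ((0 : Int), ([] : List Int))).1

-- ===== PORT B =====
-- _area_mask(i, j, ti, tj, size): closed-form value of A's double summation
def pvAreaMask (i j ti tj size : Int) : Int :=
  let ab := if i ≤ ti then (i, ti) else (ti, i)
  let bb := if j ≤ tj then (j, tj) else (tj, j)
  let nx := ab.2 - ab.1 + 1
  let ny := bb.2 - bb.1 + 1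
  let sx := PySem.Int.floordiv (nx * (ab.1 + ab.2 + 2)) 2
  let sy := PySem.Int.floordiv (ny * (bb.1 + bb.2 + 2)) 2
  ny * sx + nx * size * sy

-- body of B's phase-1 loop over one cell
def pvCellB (sol : List (List Int)) (size i1 : Int) (st : Int × List Int) (q : Int × Int) : Int × List Int :=
  if q.2 = 0 then st else
  let row := (PySem.List.pyGet? sol (q.2 - 1)).getD []
  let r0 := PySem.List.pyGetD row 0 0
  let r1 := PySem.List.pyGetD row 1 0
  let d := |i1 - r0| + |q.1 - r1|
  if d ≠ 0 then (st.1 + d, st.2 ++ [pvAreaMask i1 q.1 r0 r1 size]) else st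

def linear_conflict_and_manhattan_alt (puzzle : List (List Int)) (puzzle_solution : List (List Int)) : Int :=
  let size : Int := ((PySem.List.pyGetD puzzle 0 []).length : Int)
  let st := (PySem.List.enumerate puzzle 0).foldl (fun st p =>
    (PySem.List.enumerate p.2 0).foldl (pvCellB puzzle_solution size p.1) st) ((0 : Int), ([] : List Int))
  let moved := st.2
  (PySem.List.pyRange 0 (moved.length : Int) 1).foldl (fun score l =>
    (PySem.List.pyRange 0 l 1).foldl (fun score k =>
      if PySem.Int.band (PySem.List.pyGetD moved k 0) (PySem.List.pyGetD moved l 0) ≠ 0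
      then score + 2 else score) score) st.1

-- ===== PRECONDITION & SPEC =====
-- Pre_ excludes exactly the inputs on which the Python A raises: an empty puzzle
-- (IndexError on puzzle[0]) and any nonzero tile value whose solution row
-- puzzle_solution[value-1] does not exist or has fewer than two entries
-- (IndexError); everywhere else A (and B) return normally.
def Pre_linear_conflict_and_manhattan (puzzle : List (List Int)) (puzzle_solution : List (List Int)) : Prop :=
  puzzle ≠ [] ∧ ∀ line ∈ puzzle, ∀ v ∈ line, v ≠ 0 →
    2 ≤ ((PySem.List.pyGet? puzzle_solution (v - 1)).getD []).length
instance (puzzle : List (List Int)) (puzzle_solution : List (List Int)) : Decidable (Pre_linear_conflict_and_manhattan puzzle puzzle_solution) := by unfold Pre_linear_conflict_and_manhattan; infer_instance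

def pvWitness_linear_conflict_and_manhattan : List (List Int) × List (List Int) :=
  ([[1, 0], [3, 2]], [[0, 0], [1, 0], [1, 1]])

def Spec_linear_conflict_and_manhattan (puzzle : List (List Int)) (puzzle_solution : List (List Int)) (out : Int) : Prop := out = linear_conflict_and_manhattan_alt puzzle puzzle_solution
instance (puzzle : List (List Int)) (puzzle_solution : List (List Int)) (out : Int) : Decidable (Spec_linear_conflict_and_manhattan puzzle puzzle_solution out) := by unfold Spec_linear_conflict_and_manhattan; infer_instance

-- ===== CLAIM (what is proved, stated in full; the proofs are below) =====
def Claim_equal_linear_conflict_and_manhattan : Prop := ∀ (puzzle : List (List Int)) (puzzle_solution : List (List Int)), Dom_linear_conflict_and_manhattan puzzle puzzle_solution → Pre_linear_conflict_and_manhattan puzzle puzzle_solution → Spec_linear_conflict_and_manhattan puzzle puzzle_solution (linear_conflict_and_manhattan puzzle puzzle_solution)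

-- ===== LEMMAS AND PROOFS =====

theorem witness_ok : Dom_linear_conflict_and_manhattan pvWitness_linear_conflict_and_manhattan.1 pvWitness_linear_conflict_and_manhattan.2 ∧ Pre_linear_conflict_and_manhattan pvWitness_linear_conflict_and_manhattan.1 pvWitness_linear_conflict_and_manhattan.2 := by
  constructor <;> decide

-- sorting a two-element list
theorem sorted_pair (a b : Int) :
    PySem.List.sorted [a, b] (fun x => x) false = if a ≤ b then [a, b] else [b, a] := by
  by_cases h : a ≤ b
  · rw [if_pos h]
    exact PySem.List.sorted_id_eq_of_perm_of_pairwise _ _ (List.Perm.refl _) (by simp [h])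
  · rw [if_neg h]
    exact PySem.List.sorted_id_eq_of_perm_of_pairwise _ _ (List.Perm.swap a b [])
      (by simp [le_of_lt (lt_of_not_ge h)])

-- twice the sum of range(a, a+n)
theorem sum_pyRange (n : Nat) (a : Int) :
    2 * (PySem.List.pyRange a (a + n) 1).sum = n * (2 * a + n - 1) := by
  induction n with
  | zero => simp [PySem.List.pyRange_one_eq_nil]
  | succ m ih =>
      have h : a ≤ a + (m : Int) := by omega
      have : (a + ((m + 1 : Nat) : Int)) = (a + (m : Int)) + 1 := by push_cast; ring
      rw [this, PySem.List.pyRange_one_succ_right h]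
      simp only [List.sum_append, List.sum_cons, List.sum_nil]
      push_cast
      push_cast at ih
      linarith

theorem sum_affine (L : List Int) (c d : Int) :
    (L.map (fun x => c * x + d)).sum = c * L.sum + L.length * d := by
  induction L with
  | nil => simp
  | cons x L ih => simp [ih]; ring

theorem floordiv_two_mul (k : Int) : PySem.Int.floordiv (2 * k) 2 = k := by
  rw [PySem.Int.floordiv_eq_ediv_of_pos (by norm_num)]
  omega

theorem nested_sum (Rx Ry : List Int) (size : Int) :
    Rx.foldl (fun areas x => Ry.foldl (fun areas y => areas + (x + y * size)) areas) 0
    = (Ry.length : Int) * Rx.sum + (Rx.length : Int) * size * Ry.sum := by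
  have h1 : (fun (areas x : Int) => Ry.foldl (fun areas y => areas + (x + y * size)) areas)
      = (fun (areas x : Int) => areas + ((Ry.length : Int) * x + size * Ry.sum)) := by
    funext areas x
    rw [PySem.List.foldl_add]
    have hf : (fun y => x + y * size) = (fun y => size * y + x) := by funext y; ring
    rw [hf, sum_affine]
    ring
  rw [h1, PySem.List.foldl_add Rx (fun x => (Ry.length : Int) * x + size * Ry.sum)]
  have hf : (fun x => (Ry.length : Int) * x + size * Ry.sum)
      = (fun x => (Ry.length : Int) * x + (size * Ry.sum)) := rfl
  rw [hf, sum_affine]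
  ring

-- the double summation loop in closed form, for sorted bounds
theorem area_core (a0 a1 b0 b1 size : Int) (h1 : a0 ≤ a1) (h2 : b0 ≤ b1) :
    (PySem.List.pyRange (a0 + 1) (a1 + 2) 1).foldl (fun areas x =>
      (PySem.List.pyRange (b0 + 1) (b1 + 2) 1).foldl (fun areas y => areas + (x + y * size)) areas) 0
    = (b1 - b0 + 1) * PySem.Int.floordiv ((a1 - a0 + 1) * (a0 + a1 + 2)) 2
      + (a1 - a0 + 1) * size * PySem.Int.floordiv ((b1 - b0 + 1) * (b0 + b1 + 2)) 2 := by
  rw [nested_sum]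
  have hax : (a1 + 2) = (a0 + 1) + (((a1 - a0 + 1).toNat : Nat) : Int) := by omega
  have hay : (b1 + 2) = (b0 + 1) + (((b1 - b0 + 1).toNat : Nat) : Int) := by omega
  have hsx := sum_pyRange (a1 - a0 + 1).toNat (a0 + 1)
  have hsy := sum_pyRange (b1 - b0 + 1).toNat (b0 + 1)
  rw [← hax] at hsx
  rw [← hay] at hsy
  have hcx : (((a1 - a0 + 1).toNat : Nat) : Int) = a1 - a0 + 1 := by omega
  have hcy : (((b1 - b0 + 1).toNat : Nat) : Int) = b1 - b0 + 1 := by omega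
  rw [hcx] at hsx
  rw [hcy] at hsy
  have hfx : (a1 - a0 + 1) * (a0 + a1 + 2) = 2 * (PySem.List.pyRange (a0 + 1) (a1 + 2)).sum := by
    rw [hsx]; ring
  have hfy : (b1 - b0 + 1) * (b0 + b1 + 2) = 2 * (PySem.List.pyRange (b0 + 1) (b1 + 2)).sum := by
    rw [hsy]; ring
  rw [hfx, hfy, floordiv_two_mul, floordiv_two_mul,
    PySem.List.length_pyRange_one, PySem.List.length_pyRange_one]
  rw [show (((b1 + 2 - (b0 + 1)).toNat : Nat) : Int) = b1 - b0 + 1 from by omega,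
    show (((a1 + 2 - (a0 + 1)).toNat : Nat) : Int) = a1 - a0 + 1 from by omega]

theorem area_eq (i j ti tj size : Int) :
    pvGetAreas (i, j) (ti, tj) size = pvAreaMask i j ti tj size := by
  unfold pvGetAreas pvAreaMask
  rw [sorted_pair, sorted_pair]
  by_cases h1 : i ≤ ti <;> by_cases h2 : j ≤ tj <;>
    simp only [h1, h2, if_true, if_false] <;>
    simp only [PySem.List.pyGetD_ofNat', List.getD] <;>
    first
    | exact area_core i ti j tj size h1 h2
    | exact area_core i ti tj j size h1 (by omega)
    | exact area_core ti i j tj size (by omega) h2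
    | exact area_core ti i tj j size (by omega) (by omega)

-- pvPair seen rest: total conflict score contributed by the elements of rest,
-- appended one by one after seen (A's interleaved accounting, as one function)
def pvPair : List Int → List Int → Int
  | _, [] => 0
  | seen, a :: rest => 2 * pvConflict seen a + pvPair (seen ++ [a]) rest

theorem pvConflict_append (L : List Int) (a m : Int) :
    pvConflict (L ++ [a]) m = pvConflict L m + (if PySem.Int.band a m ≠ 0 then 1 else 0) := by
  simp [pvConflict, List.foldl_append]

theorem pvPair_append (rest : List Int) : ∀ (seen : List Int) (a : Int),
    pvPair seen (rest ++ [a]) = pvPair seen rest + 2 * pvConflict (seen ++ rest) a := by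
  induction rest with
  | nil => intro seen a; simp [pvPair]
  | cons b rest ih =>
      intro seen a
      simp only [List.cons_append, pvPair, ih (seen ++ [b]) a, List.append_assoc, List.nil_append]
      ring

-- one line of A's scan vs one line of B's phase 1
theorem fold_line (sol : List (List Int)) (size i1 : Int) :
    ∀ (E : List (Int × Int)) (sB : Int) (M : List Int),
    E.foldl (pvCellA sol size i1) (sB + pvPair [] M, M) =
      ((E.foldl (pvCellB sol size i1) (sB, M)).1 + pvPair [] (E.foldl (pvCellB sol size i1) (sB, M)).2,
       (E.foldl (pvCellB sol size i1) (sB, M)).2) := by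
  intro E
  induction E with
  | nil => intro sB M; simp
  | cons q E ih =>
      intro sB M
      simp only [List.foldl_cons]
      by_cases hz : q.2 = 0
      · rw [show pvCellA sol size i1 (sB + pvPair [] M, M) q = (sB + pvPair [] M, M) from by
            simp [pvCellA, hz],
          show pvCellB sol size i1 (sB, M) q = (sB, M) from by simp [pvCellB, hz]]
        exact ih sB M
      · by_cases hv : (|i1 - PySem.List.pyGetD ((PySem.List.pyGet? sol (q.2 - 1)).getD []) 0 0|
            + |q.1 - PySem.List.pyGetD ((PySem.List.pyGet? sol (q.2 - 1)).getD []) 1 0|) = 0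
        · rw [show pvCellA sol size i1 (sB + pvPair [] M, M) q = (sB + pvPair [] M, M) from by
              simp only [pvCellA, if_neg hz]; rw [if_neg (by simpa using hv)],
            show pvCellB sol size i1 (sB, M) q = (sB, M) from by
              simp only [pvCellB, if_neg hz]; rw [if_neg (by simpa using hv)]]
          exact ih sB M
        · set r0 := PySem.List.pyGetD ((PySem.List.pyGet? sol (q.2 - 1)).getD []) 0 0 with hr0
          set r1 := PySem.List.pyGetD ((PySem.List.pyGet? sol (q.2 - 1)).getD []) 1 0 with hr1
          set v := |i1 - r0| + |q.1 - r1| with hvv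
          set a := pvGetAreas (i1, q.1) (r0, r1) size with ha
          rw [show pvCellA sol size i1 (sB + pvPair [] M, M) q
              = (sB + pvPair [] M + v + pvConflict M a * 2, M ++ [a]) from by
            simp only [pvCellA, if_neg hz]; rw [if_pos (by simpa using hv)]]
          rw [show pvCellB sol size i1 (sB, M) q = (sB + v, M ++ [a]) from by
            simp only [pvCellB, if_neg hz]; rw [if_pos (by simpa using hv)]
            rw [ha, area_eq]]
          rw [show (sB + pvPair [] M + v + pvConflict M a * 2, M ++ [a])
              = (sB + v + pvPair [] (M ++ [a]), M ++ [a]) from by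
            rw [pvPair_append]; simp only [List.nil_append]; rw [Prod.mk.injEq]
            constructor
            · ring
            · rfl]
          exact ih (sB + v) (M ++ [a])

theorem fold_outer (sol : List (List Int)) (size : Int) :
    ∀ (R : List (Int × List Int)) (sB : Int) (M : List Int),
    R.foldl (fun st p => (PySem.List.enumerate p.2 0).foldl (pvCellA sol size p.1) st) (sB + pvPair [] M, M) =
      ((R.foldl (fun st p => (PySem.List.enumerate p.2 0).foldl (pvCellB sol size p.1) st) (sB, M)).1
         + pvPair [] (R.foldl (fun st p => (PySem.List.enumerate p.2 0).foldl (pvCellB sol size p.1) st) (sB, M)).2,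
       (R.foldl (fun st p => (PySem.List.enumerate p.2 0).foldl (pvCellB sol size p.1) st) (sB, M)).2) := by
  intro R
  induction R with
  | nil => intro sB M; simp
  | cons p R ih =>
      intro sB M
      simp only [List.foldl_cons]
      rw [fold_line sol size p.1 (PySem.List.enumerate p.2 0) sB M]
      exact ih _ _

theorem inner_eq (moved : List Int) : ∀ (l : Nat), l ≤ moved.length → ∀ (m s : Int),
    (PySem.List.pyRange 0 (l : Int) 1).foldl (fun score k =>
      if PySem.Int.band (PySem.List.pyGetD moved k 0) m ≠ 0 then score + 2 else score) s
    = s + 2 * pvConflict (moved.take l) m := by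
  intro l
  induction l with
  | zero => intro _ m s; simp [PySem.List.pyRange_one_eq_nil, pvConflict]
  | succ l ih =>
      intro hl m s
      have hcast : (((l + 1 : Nat)) : Int) = (l : Int) + 1 := by push_cast; ring
      rw [hcast, PySem.List.pyRange_one_succ_right (by positivity), List.foldl_append]
      rw [ih (by omega) m s]
      have hlt : l < moved.length := by omega
      have hget : PySem.List.pyGetD moved (l : Int) 0 = moved[l] := by
        rw [PySem.List.pyGetD_natCast, List.getD_eq_getElem moved 0 hlt]
      have htake : moved.take (l + 1) = moved.take l ++ [moved[l]] := by
        rw [List.take_add_one, List.getElem?_eq_getElem hlt]; rfl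
      rw [htake, pvConflict_append]
      simp only [List.foldl_cons, List.foldl_nil, hget]
      by_cases hb : PySem.Int.band moved[l] m ≠ 0
      · rw [if_pos hb, if_pos hb]; ring
      · rw [if_neg hb, if_neg hb]; ring

theorem outer_eq (moved : List Int) : ∀ (n : Nat), n ≤ moved.length → ∀ (s : Int),
    (PySem.List.pyRange 0 (n : Int) 1).foldl (fun score l =>
      (PySem.List.pyRange 0 l 1).foldl (fun score k =>
        if PySem.Int.band (PySem.List.pyGetD moved k 0) (PySem.List.pyGetD moved l 0) ≠ 0
        then score + 2 else score) score) s
    = s + pvPair [] (moved.take n) := by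
  intro n
  induction n with
  | zero => intro _ s; simp [PySem.List.pyRange_one_eq_nil, pvPair]
  | succ n ih =>
      intro hn s
      have hcast : (((n + 1 : Nat)) : Int) = (n : Int) + 1 := by push_cast; ring
      rw [hcast, PySem.List.pyRange_one_succ_right (by positivity), List.foldl_append]
      rw [ih (by omega) s]
      simp only [List.foldl_cons, List.foldl_nil]
      rw [inner_eq moved n (by omega)]
      have hlt : n < moved.length := by omega
      have hget : PySem.List.pyGetD moved (n : Int) 0 = moved[n] := by
        rw [PySem.List.pyGetD_natCast, List.getD_eq_getElem moved 0 hlt]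
      have htake : moved.take (n + 1) = moved.take n ++ [moved[n]] := by
        rw [List.take_add_one, List.getElem?_eq_getElem hlt]; rfl
      rw [htake, pvPair_append]
      simp only [List.nil_append, hget]
      ring

-- ===== VERDICT (by name: the statement is the Claim_ definition above) =====
theorem linear_conflict_and_manhattan_spec : Claim_equal_linear_conflict_and_manhattan := by
  intro puzzle sol _ _
  unfold Spec_linear_conflict_and_manhattan
  have hA : linear_conflict_and_manhattan puzzle sol =
      ((PySem.List.enumerate puzzle 0).foldl (fun st p =>
        (PySem.List.enumerate p.2 0).foldl
          (pvCellA sol ((PySem.List.pyGetD puzzle 0 []).length : Int) p.1) st)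
        ((0 : Int), ([] : List Int))).1 := rfl
  rw [hA]
  have h := fold_outer sol ((PySem.List.pyGetD puzzle 0 []).length : Int)
    (PySem.List.enumerate puzzle 0) 0 []
  rw [show ((0 : Int), ([] : List Int)) = ((0 : Int) + pvPair [] [], ([] : List Int)) from by
    simp [pvPair]]
  rw [h]
  have hBdef : linear_conflict_and_manhattan_alt puzzle sol =
      (let stB := (PySem.List.enumerate puzzle 0).foldl (fun st p =>
        (PySem.List.enumerate p.2 0).foldl
          (pvCellB sol ((PySem.List.pyGetD puzzle 0 []).length : Int) p.1) st)
        ((0 : Int), ([] : List Int));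
      (PySem.List.pyRange 0 (stB.2.length : Int) 1).foldl (fun score l =>
        (PySem.List.pyRange 0 l 1).foldl (fun score k =>
          if PySem.Int.band (PySem.List.pyGetD stB.2 k 0) (PySem.List.pyGetD stB.2 l 0) ≠ 0
          then score + 2 else score) score) stB.1) := rfl
  rw [hBdef]
  simp only []
  rw [outer_eq _ _ (le_refl _)]
  rw [List.take_length]
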